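-- pv_equiv track=rewrite | github.com/scientistigwe/end-2-end-data-pipeline | backend/backend/data_pipeline/source/cloud/s3_manager.py | _analyze_size_distribution
-- ===== SOURCE A (Python) =====
-- from typing import Dict, Any, Optional, List
--
-- def _analyze_size_distribution(
--
--         objects: List[Dict[str, Any]]
-- ) -> Dict[str, int]:
--     """Analyze distribution of object sizes"""
--     size_ranges = {
--         'small': 0,  # < 1MB
--         'medium': 0,  # 1MB - 100MB
--         'large': 0,  # 100MB - 1GB
--         'very_large': 0  # > 1GB
--     }
--
--     for obj in objects:
--         size = obj.get('size', 0)
--         if size < 1024 * 1024: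
--             size_ranges['small'] += 1
--         elif size < 100 * 1024 * 1024:
--             size_ranges['medium'] += 1
--         elif size < 1024 * 1024 * 1024:
--             size_ranges['large'] += 1
--         else:
--             size_ranges['very_large'] += 1
--
--     return size_ranges
-- ===== SOURCE B (Python) =====
-- from typing import Dict, Any, List
--
-- def _analyze_size_distribution(
--         objects: List[Dict[str, Any]]
-- ) -> Dict[str, int]:
--     """Analyze distribution of object sizes (threshold-table bucketing)."""
--     thresholds = [1024 * 1024, 100 * 1024 * 1024, 1024 * 1024 * 1024]
--     labels = ['small', 'medium', 'large', 'very_large']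
--     counts = [0, 0, 0, 0]
--     for obj in objects:
--         size = obj.get('size', 0)
--         idx = sum(size >= t for t in thresholds)
--         counts[idx] += 1
--     return dict(zip(labels, counts))
-- ===== Notes on version B (the rewrite author's own statement) =====
-- stated objective: idiomatic
-- what changed: Replaces the if/elif comparison cascade updating a dict in place with a parallel threshold/label table: each object's bucket index is computed as the number of thresholds it reaches, a counts array is incremented, and the dict is assembled once at the end via zip.
import Mathlib
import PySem

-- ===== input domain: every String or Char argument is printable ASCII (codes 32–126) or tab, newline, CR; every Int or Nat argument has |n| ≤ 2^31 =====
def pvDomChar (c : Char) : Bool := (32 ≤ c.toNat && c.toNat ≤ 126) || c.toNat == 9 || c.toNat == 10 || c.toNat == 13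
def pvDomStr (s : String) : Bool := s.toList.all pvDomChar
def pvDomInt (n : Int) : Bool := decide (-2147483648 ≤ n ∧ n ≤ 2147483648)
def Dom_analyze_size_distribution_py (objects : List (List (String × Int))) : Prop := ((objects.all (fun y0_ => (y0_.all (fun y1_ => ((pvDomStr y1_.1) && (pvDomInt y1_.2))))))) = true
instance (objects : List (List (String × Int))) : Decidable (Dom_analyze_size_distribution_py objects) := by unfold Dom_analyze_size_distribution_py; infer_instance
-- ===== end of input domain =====

-- B replaces A's if/elif cascade updating a dict in place by a threshold-table pass:
-- bucket index = number of thresholds reached, counts array, dict assembled once at the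
-- end via zip (objective: idiomatic; same O(n) cost, not claimed faster).

-- ===== PORT A =====
-- loop body of A's for-loop (the if/elif cascade on the size_ranges dict)
def pvStepA (st : PySem.Dict String Int) (obj : List (String × Int)) : PySem.Dict String Int :=
  let size := (PySem.Dict.mk obj).getD "size" 0
  if size < 1024 * 1024 then st.modify "small" 0 (· + 1)
  else if size < 100 * 1024 * 1024 then st.modify "medium" 0 (· + 1)
  else if size < 1024 * 1024 * 1024 then st.modify "large" 0 (· + 1)
  else st.modify "very_large" 0 (· + 1)

def analyze_size_distribution_py (objects : List (List (String × Int))) : List (String × Int) :=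
  let size_ranges : PySem.Dict String Int :=
    PySem.Dict.mk [("small", 0), ("medium", 0), ("large", 0), ("very_large", 0)]
  (objects.foldl pvStepA size_ranges).items

-- ===== PORT B =====
-- loop body of B's for-loop: idx = sum(size >= t for t in thresholds); counts[idx] += 1
def pvStepB (cs : List Int) (obj : List (String × Int)) : List Int :=
  let size := (PySem.Dict.mk obj).getD "size" 0
  let idx : Int := ([1024 * 1024, 100 * 1024 * 1024, 1024 * 1024 * 1024] : List Int).foldl
    (fun acc t => acc + (if size ≥ t then 1 else 0)) 0
  PySem.List.pySetD cs idx (PySem.List.pyGetD cs idx 0 + 1)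

def analyze_size_distribution_py_alt (objects : List (List (String × Int))) : List (String × Int) :=
  let labels : List String := ["small", "medium", "large", "very_large"]
  let counts := objects.foldl pvStepB [0, 0, 0, 0]
  labels.zip counts

-- ===== PRECONDITION & SPEC =====
def Spec_analyze_size_distribution_py (objects : List (List (String × Int))) (out : List (String × Int)) : Prop := out = analyze_size_distribution_py_alt objects
instance (objects : List (List (String × Int))) (out : List (String × Int)) : Decidable (Spec_analyze_size_distribution_py objects out) := by unfold Spec_analyze_size_distribution_py; infer_instance

-- ===== CLAIM (what is proved, stated in full; the proofs are below) =====
def Claim_equal_analyze_size_distribution_py : Prop := ∀ (objects : List (List (String × Int))), Dom_analyze_size_distribution_py objects → Spec_analyze_size_distribution_py objects (analyze_size_distribution_py objects)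

-- ===== LEMMAS AND PROOFS =====

-- one step of A and one step of B, on corresponding states, in each of the four buckets
lemma pv_stepA_eq (obj : List (String × Int)) (a b c d : Int) :
    pvStepA (PySem.Dict.mk [("small", a), ("medium", b), ("large", c), ("very_large", d)]) obj
      = (let size := (PySem.Dict.mk obj).getD "size" 0
         if size < 1024 * 1024 then
           PySem.Dict.mk [("small", a + 1), ("medium", b), ("large", c), ("very_large", d)]
         else if size < 100 * 1024 * 1024 then
           PySem.Dict.mk [("small", a), ("medium", b + 1), ("large", c), ("very_large", d)]
         else if size < 1024 * 1024 * 1024 then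
           PySem.Dict.mk [("small", a), ("medium", b), ("large", c + 1), ("very_large", d)]
         else
           PySem.Dict.mk [("small", a), ("medium", b), ("large", c), ("very_large", d + 1)]) := by
  unfold pvStepA
  dsimp only
  split_ifs with h1 h2 h3 <;>
    simp [PySem.Dict.modify, PySem.Dict.insert, PySem.Dict.contains, PySem.Dict.get?,
      PySem.Dict.getD]

lemma pv_stepB_eq (obj : List (String × Int)) (a b c d : Int) :
    pvStepB [a, b, c, d] obj
      = (let size := (PySem.Dict.mk obj).getD "size" 0
         if size < 1024 * 1024 then [a + 1, b, c, d]
         else if size < 100 * 1024 * 1024 then [a, b + 1, c, d]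
         else if size < 1024 * 1024 * 1024 then [a, b, c + 1, d]
         else [a, b, c, d + 1]) := by
  unfold pvStepB
  dsimp only
  set size := (PySem.Dict.mk obj).getD "size" 0 with hs
  split_ifs with h1 h2 h3
  · have g1 : ¬ size ≥ (1024 * 1024 : Int) := by omega
    have g2 : ¬ size ≥ (100 * 1024 * 1024 : Int) := by omega
    have g3 : ¬ size ≥ (1024 * 1024 * 1024 : Int) := by omega
    simp only [List.foldl_cons, List.foldl_nil, if_neg g1, if_neg g2, if_neg g3]
    norm_num [PySem.List.pySetD, PySem.List.pySet?, PySem.List.pyGetD, PySem.List.pyGet?,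
      PySem.List.pyIdx?]
    try rfl
  · have g1 : size ≥ (1024 * 1024 : Int) := by omega
    have g2 : ¬ size ≥ (100 * 1024 * 1024 : Int) := by omega
    have g3 : ¬ size ≥ (1024 * 1024 * 1024 : Int) := by omega
    simp only [List.foldl_cons, List.foldl_nil, if_pos g1, if_neg g2, if_neg g3]
    norm_num [PySem.List.pySetD, PySem.List.pySet?, PySem.List.pyGetD, PySem.List.pyGet?,
      PySem.List.pyIdx?]
    try rfl
  · have g1 : size ≥ (1024 * 1024 : Int) := by omega
    have g2 : size ≥ (100 * 1024 * 1024 : Int) := by omega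
    have g3 : ¬ size ≥ (1024 * 1024 * 1024 : Int) := by omega
    simp only [List.foldl_cons, List.foldl_nil, if_pos g1, if_pos g2, if_neg g3]
    norm_num [PySem.List.pySetD, PySem.List.pySet?, PySem.List.pyGetD, PySem.List.pyGet?,
      PySem.List.pyIdx?]
    try rfl
  · have g1 : size ≥ (1024 * 1024 : Int) := by omega
    have g2 : size ≥ (100 * 1024 * 1024 : Int) := by omega
    have g3 : size ≥ (1024 * 1024 * 1024 : Int) := by omega
    simp only [List.foldl_cons, List.foldl_nil, if_pos g1, if_pos g2, if_pos g3]
    norm_num [PySem.List.pySetD, PySem.List.pySet?, PySem.List.pyGetD, PySem.List.pyGet?,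
      PySem.List.pyIdx?]
    try rfl

-- invariant: A's dict state corresponds to B's counts array, for arbitrary running counts
lemma pv_invariant (objects : List (List (String × Int))) :
    ∀ (a b c d : Int),
    (objects.foldl pvStepA
      (PySem.Dict.mk [("small", a), ("medium", b), ("large", c), ("very_large", d)])).items
    = ["small", "medium", "large", "very_large"].zip (objects.foldl pvStepB [a, b, c, d]) := by
  induction objects with
  | nil => intro a b c d; rfl
  | cons obj rest ih =>
    intro a b c d
    simp only [List.foldl_cons, pv_stepA_eq, pv_stepB_eq]
    split_ifs <;> apply ih

-- ===== VERDICT (by name: the statement is the Claim_ definition above) =====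
theorem analyze_size_distribution_py_spec : Claim_equal_analyze_size_distribution_py := by
  intro objects _
  unfold Spec_analyze_size_distribution_py analyze_size_distribution_py analyze_size_distribution_py_alt
  exact pv_invariant objects 0 0 0 0
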